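-- pv_equiv track=rewrite | github.com/CanastaWiki/Canasta-CLI | direct_commands.py | _set_env_entry
-- ===== SOURCE A (Python) =====
-- def _set_env_entry(entries, key, value):
--     """Update first occurrence, drop duplicate lines for the same key,
--     append if absent. Matches canasta_env.set_variable() in Ansible."""
--     found = False
--     new_entries = []
--     for k, v, c in entries:
--         if not c and k == key:
--             if not found:
--                 new_entries.append((key, value, False))
--                 found = True
--             # Drop subsequent duplicates
--         else:
--             new_entries.append((k, v, c))
--     if not found:
--         new_entries.append((key, value, False))
--     return new_entries
-- ===== SOURCE B (Python) =====
-- def _set_env_entry(entries, key, value):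
--     entries = list(entries)
--     positions = [i for i, (k, v, c) in enumerate(entries) if not c and k == key]
--     if not positions:
--         return entries + [(key, value, False)]
--     first = positions[0]
--     drop = set(positions[1:])
--     return [
--         (key, value, False) if i == first else (k, v, c)
--         for i, (k, v, c) in enumerate(entries)
--         if i == first or i not in drop
--     ]
-- ===== Notes on version B (the rewrite author's own statement) =====
-- stated objective: alternative
-- what changed: Replaces the flag-carrying single accumulator loop with a two-phase plan: first collect the indices of all uncommented matching entries, then rebuild the list in one comprehension that substitutes at the first match index and skips the remaining match indices.
import Mathlib
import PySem

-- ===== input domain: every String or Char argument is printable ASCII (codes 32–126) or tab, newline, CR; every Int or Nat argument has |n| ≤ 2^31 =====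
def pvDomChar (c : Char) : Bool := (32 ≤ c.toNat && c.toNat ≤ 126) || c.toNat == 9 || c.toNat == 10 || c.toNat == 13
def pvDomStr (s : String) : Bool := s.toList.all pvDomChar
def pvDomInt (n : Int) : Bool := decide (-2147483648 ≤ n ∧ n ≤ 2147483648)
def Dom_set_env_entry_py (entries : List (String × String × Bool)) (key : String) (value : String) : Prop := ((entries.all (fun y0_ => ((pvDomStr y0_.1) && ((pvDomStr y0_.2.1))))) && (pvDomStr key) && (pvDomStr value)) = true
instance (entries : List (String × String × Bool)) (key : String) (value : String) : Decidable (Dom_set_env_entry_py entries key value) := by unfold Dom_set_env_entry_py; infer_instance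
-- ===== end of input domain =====

-- B rebuilds the list from a precomputed index table (first match index + later duplicates to drop) instead of A's flag-carrying accumulator loop; objective: alternative decomposition, same cost.


-- ===== PORT A =====
-- literal port of A's loop: state = (found, new_entries), entries consumed left to right
def pvEnvLoopA (key value : String) : List (String × String × Bool) → Bool → List (String × String × Bool) → List (String × String × Bool)
  | [], found, acc => if !found then acc ++ [(key, value, false)] else acc
  | (k, v, c) :: rest, found, acc =>
    if !c && k == key then
      if !found then pvEnvLoopA key value rest true (acc ++ [(key, value, false)])
      else pvEnvLoopA key value rest found acc
    else pvEnvLoopA key value rest found (acc ++ [(k, v, c)])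

def set_env_entry_py (entries : List (String × String × Bool)) (key : String) (value : String) : List (String × String × Bool) :=
  pvEnvLoopA key value entries false []

-- ===== PORT B =====
-- port of Python's enumerate(entries) (from index i)
def pvEnumFrom {α : Type} (i : Nat) : List α → List (Nat × α)
  | [] => []
  | x :: xs => (i, x) :: pvEnumFrom (i + 1) xs

def set_env_entry_py_alt (entries : List (String × String × Bool)) (key : String) (value : String) : List (String × String × Bool) :=
  let positions := (pvEnumFrom 0 entries).filterMap
    (fun p => if !p.2.2.2 && p.2.1 == key then some p.1 else none)
  match positions with
  | [] => entries ++ [(key, value, false)]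
  | first :: drop =>
    (pvEnumFrom 0 entries).filterMap (fun p =>
      if p.1 = first then some (key, value, false)
      else if p.1 ∈ drop then none
      else some (p.2.1, p.2.2.1, p.2.2.2))

-- ===== PRECONDITION & SPEC =====
def Spec_set_env_entry_py (entries : List (String × String × Bool)) (key : String) (value : String) (out : List (String × String × Bool)) : Prop := out = set_env_entry_py_alt entries key value
instance (entries : List (String × String × Bool)) (key : String) (value : String) (out : List (String × String × Bool)) : Decidable (Spec_set_env_entry_py entries key value out) := by unfold Spec_set_env_entry_py; infer_instance

-- ===== CLAIM (what is proved, stated in full; the proofs are below) =====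
def Claim_equal_set_env_entry_py : Prop := ∀ (entries : List (String × String × Bool)) (key : String) (value : String), Dom_set_env_entry_py entries key value → Spec_set_env_entry_py entries key value (set_env_entry_py entries key value)

-- ===== LEMMAS AND PROOFS =====

-- the match-index table B computes, as a named function for the proofs
def posF (key : String) (i : Nat) (es : List (String × String × Bool)) : List Nat :=
  (pvEnumFrom i es).filterMap (fun p => if !p.2.2.2 && p.2.1 == key then some p.1 else none)

theorem posF_nil (key : String) (i : Nat) : posF key i [] = [] := rfl

theorem posF_cons (key : String) (i : Nat) (e : String × String × Bool) (es : List (String × String × Bool)) :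
    posF key i (e :: es) =
      if !e.2.2 && e.1 == key then i :: posF key (i + 1) es else posF key (i + 1) es := by
  simp only [posF, pvEnumFrom, List.filterMap_cons]
  split_ifs <;> simp_all

theorem mem_posF_ge (key : String) :
    ∀ (es : List (String × String × Bool)) (i j : Nat), j ∈ posF key i es → i ≤ j := by
  intro es
  induction es with
  | nil => intro i j h; simp [posF_nil] at h
  | cons e es ih =>
    intro i j h
    rw [posF_cons] at h
    split_ifs at h with hc
    · rcases List.mem_cons.mp h with h | h
      · omega
      · have := ih (i + 1) j h; omega
    · have := ih (i + 1) j h; omega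

theorem posF_nil_iff (key : String) :
    ∀ (es : List (String × String × Bool)) (i : Nat),
      posF key i es = [] ↔ ∀ e ∈ es, (!e.2.2 && e.1 == key) = false := by
  intro es
  induction es with
  | nil => intro i; simp [posF_nil]
  | cons e es ih =>
    intro i
    rw [posF_cons]
    split_ifs with hc
    · constructor
      · intro h; simp at h
      · intro h
        have := h e (List.mem_cons_self ..)
        rw [hc] at this; cases this
    · simp only [List.mem_cons]
      constructor
      · intro h x hx
        rcases hx with rfl | hx
        · simpa using hc
        · exact ((ih (i + 1)).mp h) x hx
      · intro h
        exact (ih (i + 1)).mpr (fun x hx => h x (Or.inr hx))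

-- A's loop once found = true: keeps exactly the non-matching entries
theorem loopA_found (key value : String) :
    ∀ (es : List (String × String × Bool)) (acc : List (String × String × Bool)),
      pvEnvLoopA key value es true acc = acc ++ es.filter (fun e => !(!e.2.2 && e.1 == key)) := by
  intro es
  induction es with
  | nil => intro acc; simp [pvEnvLoopA]
  | cons e es ih =>
    intro acc
    obtain ⟨k, v, c⟩ := e
    simp only [pvEnvLoopA]
    by_cases hc : (!c && k == key) = true
    · simp only [hc, if_pos, Bool.not_true, Bool.false_eq_true, if_false]
      rw [ih]
      simp only [List.filter_cons]
      rw [if_neg (by simp [hc])]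
    · have hc' : (!c && k == key) = false := by simpa using hc
      simp only [hc', Bool.false_eq_true, if_false]
      rw [ih]
      simp only [List.filter_cons]
      rw [if_pos (by simp [hc'])]
      simp

-- A's loop when nothing ahead matches, found = false: passes everything through and appends
theorem loopA_nomatch (key value : String) :
    ∀ (es : List (String × String × Bool)) (acc : List (String × String × Bool)),
      (∀ e ∈ es, (!e.2.2 && e.1 == key) = false) →
      pvEnvLoopA key value es false acc = acc ++ es ++ [(key, value, false)] := by
  intro es
  induction es with
  | nil => intro acc _; simp [pvEnvLoopA]
  | cons e es ih =>
    intro acc h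
    obtain ⟨k, v, c⟩ := e
    simp only [pvEnvLoopA]
    have h0 : (!c && k == key) = false := h (k, v, c) (List.mem_cons_self ..)
    rw [h0]
    simp only [Bool.false_eq_true, if_false]
    rw [ih _ (fun x hx => h x (List.mem_cons_of_mem _ hx))]
    simp

-- B's rebuild pass after the first match: drops exactly the matching entries
theorem rebuild_found (key value : String) (first : Nat) (drop : List Nat) :
    ∀ (es : List (String × String × Bool)) (i : Nat),
      first < i →
      (∀ j, i ≤ j → (j ∈ drop ↔ j ∈ posF key i es)) →
      (pvEnumFrom i es).filterMap (fun p =>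
          if p.1 = first then some (key, value, false)
          else if p.1 ∈ drop then none
          else some (p.2.1, p.2.2.1, p.2.2.2)) =
        es.filter (fun e => !(!e.2.2 && e.1 == key)) := by
  intro es
  induction es with
  | nil => intro i _ _; simp [pvEnumFrom]
  | cons e es ih =>
    intro i hfi hdrop
    obtain ⟨k, v, c⟩ := e
    simp only [pvEnumFrom, List.filterMap_cons]
    have hne : ¬ (i = first) := by omega
    by_cases hc : (!c && k == key) = true
    · have hposi : i ∈ posF key i ((k, v, c) :: es) := by
        rw [posF_cons]; simp [hc]
      have hidrop : i ∈ drop := (hdrop i (le_refl i)).mpr hposi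
      simp only [hne, if_false, hidrop, if_pos]
      rw [ih (i + 1) (by omega)]
      · simp only [List.filter_cons]
        rw [if_neg (by simp [hc])]
      · intro j hj
        have h1 := hdrop j (by omega)
        rw [posF_cons] at h1
        simp only [hc, if_pos] at h1
        constructor
        · intro hjd
          rcases List.mem_cons.mp (h1.mp hjd) with rfl | h
          · omega
          · exact h
        · intro h
          exact h1.mpr (List.mem_cons_of_mem _ h)
    · have hc' : (!c && k == key) = false := by simpa using hc
      have hnd : ¬ (i ∈ drop) := by
        intro hid
        have := (hdrop i (le_refl i)).mp hid
        rw [posF_cons] at this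
        simp only [hc', Bool.false_eq_true, if_false] at this
        have := mem_posF_ge key es (i + 1) i this
        omega
      simp only [hne, if_false, hnd]
      rw [ih (i + 1) (by omega)]
      · simp only [List.filter_cons]
        rw [if_pos (by simp [hc'])]
      · intro j hj
        have h1 := hdrop j (by omega)
        rw [posF_cons] at h1
        simpa [hc'] using h1
-- main lemma: found = false, matches ahead
theorem loopA_rebuild (key value : String) :
    ∀ (es : List (String × String × Bool)) (i : Nat) (acc : List (String × String × Bool))
      (first : Nat) (drop : List Nat),
      posF key i es = first :: drop →
      pvEnvLoopA key value es false acc =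
        acc ++ (pvEnumFrom i es).filterMap (fun p =>
          if p.1 = first then some (key, value, false)
          else if p.1 ∈ drop then none
          else some (p.2.1, p.2.2.1, p.2.2.2)) := by
  intro es
  induction es with
  | nil => intro i acc first drop h; simp [posF_nil] at h
  | cons e es ih =>
    intro i acc first drop h
    obtain ⟨k, v, c⟩ := e
    rw [posF_cons] at h
    simp only [pvEnumFrom, List.filterMap_cons, pvEnvLoopA]
    by_cases hc : (!c && k == key) = true
    · simp only [hc, if_pos] at h ⊢
      obtain ⟨rfl, rfl⟩ : i = first ∧ posF key (i + 1) es = drop := by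
        constructor
        · exact (List.cons.injEq .. ▸ h).1
        · exact (List.cons.injEq .. ▸ h).2
      simp only [Bool.not_false, if_pos]
      rw [loopA_found, rebuild_found key value i _ es (i + 1) (by omega) (fun j hj => Iff.rfl)]
      simp
    · have hc' : (!c && k == key) = false := by simpa using hc
      simp only [hc', Bool.false_eq_true, if_false] at h ⊢
      have hfirst : first ∈ posF key (i + 1) es := by rw [h]; exact List.mem_cons_self ..
      have hfi : i + 1 ≤ first := mem_posF_ge key es (i + 1) first hfirst
      have hne : ¬ (i = first) := by omega
      have hnd : ¬ (i ∈ drop) := by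
        intro hid
        have : i ∈ posF key (i + 1) es := by rw [h]; exact List.mem_cons_of_mem _ hid
        have := mem_posF_ge key es (i + 1) i this
        omega
      simp only [hne, if_false, hnd]
      rw [ih (i + 1) (acc ++ [(k, v, c)]) first drop h]
      simp

-- ===== VERDICT (by name: the statement is the Claim_ definition above) =====
theorem set_env_entry_py_spec : Claim_equal_set_env_entry_py := by
  intro entries key value _
  unfold Spec_set_env_entry_py set_env_entry_py set_env_entry_py_alt
  have hpos : (pvEnumFrom 0 entries).filterMap
      (fun p => if !p.2.2.2 && p.2.1 == key then some p.1 else none) = posF key 0 entries := rfl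
  rw [hpos]
  cases hp : posF key 0 entries with
  | nil =>
    simp only []
    rw [loopA_nomatch key value entries [] ((posF_nil_iff key entries 0).mp hp)]
    simp
  | cons first drop =>
    simp only []
    rw [loopA_rebuild key value entries 0 [] first drop hp]
    simp
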